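-- pv_equiv track=rewrite | github.com/smalih/Informatics-Olympiad | 2014/Round 1/LuckyNumbers.py | largestSmallest
-- ===== SOURCE A (Python) =====
-- def largestSmallest(target, luckyNum_array):
--   target_largest = target_smallest = target
--   while True:
--     target_largest+=1
--     if target_largest in luckyNum_array:
--       break
--   while True:
--     target_smallest-=1
--     if target_smallest in luckyNum_array:
--       break
--   return target_smallest, target_largest
-- ===== SOURCE B (Python) =====
-- def largestSmallest(target, luckyNum_array):
--   below = max(x for x in luckyNum_array if x < target)
--   above = min(x for x in luckyNum_array if x > target)
--   return below, above
-- ===== Notes on version B (the rewrite author's own statement) =====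
-- stated objective: faster
-- what changed: A steps away from target one integer at a time, scanning the whole list for membership at every step; B makes one pass taking max of elements below and min of elements above target.
import Mathlib
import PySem

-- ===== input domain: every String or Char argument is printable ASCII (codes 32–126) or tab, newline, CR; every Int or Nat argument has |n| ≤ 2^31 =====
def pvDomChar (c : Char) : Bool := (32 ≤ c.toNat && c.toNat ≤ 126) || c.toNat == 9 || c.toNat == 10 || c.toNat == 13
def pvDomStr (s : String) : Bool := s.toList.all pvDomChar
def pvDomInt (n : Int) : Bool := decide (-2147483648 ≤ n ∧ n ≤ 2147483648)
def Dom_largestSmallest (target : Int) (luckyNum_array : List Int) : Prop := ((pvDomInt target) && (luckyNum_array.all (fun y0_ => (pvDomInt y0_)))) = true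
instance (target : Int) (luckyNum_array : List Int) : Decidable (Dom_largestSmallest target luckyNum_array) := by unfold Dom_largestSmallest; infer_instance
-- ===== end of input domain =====

-- B replaces A's step-by-step outward scan (membership test per step) by a single
-- pass taking the max element below and the min element above the target (faster; asymptotic).


-- ===== PORT A =====
-- A's first while loop: step upward from t, testing membership each step.
-- Fuel only makes the recursion total; under Pre_ it is never exhausted.
def upSearch (arr : List Int) : Nat → Int → Int
  | 0, t => t
  | n+1, t =>
    let t' := t + 1
    if t' ∈ arr then t' else upSearch arr n t'

-- A's second while loop: step downward from t.
def downSearch (arr : List Int) : Nat → Int → Int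
  | 0, t => t
  | n+1, t =>
    let t' := t - 1
    if t' ∈ arr then t' else downSearch arr n t'

def largestSmallest (target : Int) (luckyNum_array : List Int) : Int × Int :=
  let fuelUp := (luckyNum_array.map (fun x => (x - target).toNat)).foldl max 0
  let fuelDown := (luckyNum_array.map (fun x => (target - x).toNat)).foldl max 0
  (downSearch luckyNum_array fuelDown target, upSearch luckyNum_array fuelUp target)

-- ===== PORT B =====
def largestSmallest_alt (target : Int) (luckyNum_array : List Int) : Int × Int :=
  let below := (PySem.List.max? (luckyNum_array.filter (fun x => x < target)) (fun y => y)).getD 0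
  let above := (PySem.List.min? (luckyNum_array.filter (fun x => target < x)) (fun y => y)).getD 0
  (below, above)

-- ===== PRECONDITION & SPEC =====
-- Pre_ excludes exactly the inputs with no element strictly below (or strictly above)
-- the target: there A's while loop never terminates (and B's max/min raises ValueError).
def Pre_largestSmallest (target : Int) (luckyNum_array : List Int) : Prop :=
  (∃ x ∈ luckyNum_array, x < target) ∧ (∃ x ∈ luckyNum_array, target < x)
instance (target : Int) (luckyNum_array : List Int) : Decidable (Pre_largestSmallest target luckyNum_array) := by unfold Pre_largestSmallest; infer_instance
def pvWitness_largestSmallest : Int × List Int := (5, [1, 9, 3, 7])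

def Spec_largestSmallest (target : Int) (luckyNum_array : List Int) (out : Int × Int) : Prop := out = largestSmallest_alt target luckyNum_array
instance (target : Int) (luckyNum_array : List Int) (out : Int × Int) : Decidable (Spec_largestSmallest target luckyNum_array out) := by unfold Spec_largestSmallest; infer_instance

-- ===== CLAIM (what is proved, stated in full; the proofs are below) =====
def Claim_equal_largestSmallest : Prop := ∀ (target : Int) (luckyNum_array : List Int), Dom_largestSmallest target luckyNum_array → Pre_largestSmallest target luckyNum_array → Spec_largestSmallest target luckyNum_array (largestSmallest target luckyNum_array)

-- ===== LEMMAS AND PROOFS =====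

-- A's upward loop returns the least element of arr strictly greater than t,
-- provided such an element lies within the fuel.
theorem upSearch_spec (arr : List Int) :
    ∀ (n : Nat) (t a : Int), a ∈ arr → t < a → a ≤ t + n →
      upSearch arr n t ∈ arr ∧ t < upSearch arr n t ∧
        ∀ b ∈ arr, t < b → upSearch arr n t ≤ b := by
  intro n
  induction n with
  | zero => intro t a ha hlt hle; omega
  | succ n ih =>
    intro t a ha hlt hle
    simp only [upSearch]
    by_cases hmem : t + 1 ∈ arr
    · rw [if_pos hmem]
      exact ⟨hmem, by omega, fun b _ hb => by omega⟩
    · rw [if_neg hmem]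
      have hane : a ≠ t + 1 := fun h => hmem (h ▸ ha)
      have ⟨h1, h2, h3⟩ := ih (t + 1) a ha (by omega) (by omega)
      refine ⟨h1, by omega, fun b hb htb => ?_⟩
      have : b ≠ t + 1 := fun h => hmem (h ▸ hb)
      exact h3 b hb (by omega)

theorem downSearch_spec (arr : List Int) :
    ∀ (n : Nat) (t a : Int), a ∈ arr → a < t → t - n ≤ a →
      downSearch arr n t ∈ arr ∧ downSearch arr n t < t ∧
        ∀ b ∈ arr, b < t → b ≤ downSearch arr n t := by
  intro n
  induction n with
  | zero => intro t a ha hlt hle; omega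
  | succ n ih =>
    intro t a ha hlt hle
    simp only [downSearch]
    by_cases hmem : t - 1 ∈ arr
    · rw [if_pos hmem]
      exact ⟨hmem, by omega, fun b _ hb => by omega⟩
    · rw [if_neg hmem]
      have hane : a ≠ t - 1 := fun h => hmem (h ▸ ha)
      have ⟨h1, h2, h3⟩ := ih (t - 1) a ha (by omega) (by omega)
      refine ⟨h1, by omega, fun b hb htb => ?_⟩
      have : b ≠ t - 1 := fun h => hmem (h ▸ hb)
      exact h3 b hb (by omega)

-- min? of the filtered list is exactly the least element above t.
theorem min?_filter_eq (arr : List Int) (t m : Int)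
    (hm : m ∈ arr) (hlt : t < m) (hmin : ∀ b ∈ arr, t < b → m ≤ b) :
    PySem.List.min? (arr.filter (fun x => t < x)) (fun y => y) = some m := by
  have hmf : m ∈ arr.filter (fun x => t < x) := by
    simp [List.mem_filter, hm, hlt]
  cases hsome : PySem.List.min? (arr.filter (fun x => t < x)) (fun y => y) with
  | none =>
    rw [PySem.List.min?_eq_none_iff] at hsome
    rw [hsome] at hmf; simp at hmf
  | some m' =>
    have hm'mem := PySem.List.min?_mem hsome
    have h1 := PySem.List.min?_isMin hsome m hmf
    rw [List.mem_filter] at hm'mem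
    have h2 := hmin m' hm'mem.1 (by simpa using hm'mem.2)
    simp only [Option.some.injEq]
    omega

theorem max?_filter_eq (arr : List Int) (t m : Int)
    (hm : m ∈ arr) (hlt : m < t) (hmax : ∀ b ∈ arr, b < t → b ≤ m) :
    PySem.List.max? (arr.filter (fun x => x < t)) (fun y => y) = some m := by
  have hmf : m ∈ arr.filter (fun x => x < t) := by
    simp [List.mem_filter, hm, hlt]
  cases hsome : PySem.List.max? (arr.filter (fun x => x < t)) (fun y => y) with
  | none =>
    rw [PySem.List.max?_eq_none_iff] at hsome
    rw [hsome] at hmf; simp at hmf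
  | some m' =>
    have hm'mem := PySem.List.max?_mem hsome
    have h1 := PySem.List.max?_isMax hsome m hmf
    rw [List.mem_filter] at hm'mem
    have h2 := hmax m' hm'mem.1 (by simpa using hm'mem.2)
    simp only [Option.some.injEq]
    omega

-- ===== VERDICT (by name: the statement is the Claim_ definition above) =====
theorem largestSmallest_spec : Claim_equal_largestSmallest := by
  intro target arr _ ⟨⟨lo, hloMem, hloLt⟩, ⟨hi, hhiMem, hhiLt⟩⟩
  unfold Spec_largestSmallest largestSmallest largestSmallest_alt
  have hfu : (hi - target).toNat ≤ (arr.map (fun x => (x - target).toNat)).foldl max 0 :=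
    (PySem.List.le_foldl_max (arr.map (fun x => (x - target).toNat)) 0).2 _
      (List.mem_map_of_mem hhiMem)
  have hfd : (target - lo).toNat ≤ (arr.map (fun x => (target - x).toNat)).foldl max 0 :=
    (PySem.List.le_foldl_max (arr.map (fun x => (target - x).toNat)) 0).2 _
      (List.mem_map_of_mem hloMem)
  have ⟨hu1, hu2, hu3⟩ := upSearch_spec arr
    ((arr.map (fun x => (x - target).toNat)).foldl max 0) target hi hhiMem hhiLt (by omega)
  have ⟨hd1, hd2, hd3⟩ := downSearch_spec arr
    ((arr.map (fun x => (target - x).toNat)).foldl max 0) target lo hloMem hloLt (by omega)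
  rw [min?_filter_eq arr target _ hu1 hu2 hu3,
      max?_filter_eq arr target _ hd1 hd2 hd3]
  rfl
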